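-- pv_equiv track=rewrite | github.com/LaurenaPo/Protein-analysis | classical_3_states.py | classical_3_states
-- ===== SOURCE A (Python) =====
-- def equality(a, b, c, letter):
--     if a == b and b == c and c == letter:
--         return 1
--     return 0
--
-- def equality_two(a, b, c, letter):
--     if (a == b and a == letter) or (a == c and a == letter) or (b == c and b == letter):
--         return 1
--     return 0
--
-- def one_equality(a, b, c, letter):
--     if (a == letter and b != letter and c != letter) or (b == letter and a != letter and c != letter) or (
--             c == letter and a != letter and b != letter):
--         return 1
--     return 0
--
-- def classical_3_states(dssp_struct, stride_struct, promotif_struct, len):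
--     classical_3_states_tab = []
--
--     for i in range(len):
--         a = dssp_struct[i]
--         b = stride_struct[i]
--         c = promotif_struct[i]
--
--         if equality(a, b, c, "H") == 1:
--             classical_3_states_tab.append("H")
--         elif equality(a, b, c, "E") == 1:
--             classical_3_states_tab.append("E")
--         elif equality(a, b, c, "C") == 1:
--             classical_3_states_tab.append("C")
--
--         elif equality_two(a, b, c, "H") == 1:
--             classical_3_states_tab.append("h")
--         elif equality_two(a, b, c, "E") == 1:
--             classical_3_states_tab.append("e")
--         elif equality_two(a, b, c, "C") == 1:
--             classical_3_states_tab.append("c")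
--
--         elif one_equality(a, b, c, "H") == 1:
--             classical_3_states_tab.append("*")
--         elif one_equality(a, b, c, "E") == 1:
--             classical_3_states_tab.append("*")
--         elif one_equality(a, b, c, "C") == 1:
--             classical_3_states_tab.append("*")
--
--         else:
--             classical_3_states_tab.append("-")
--
--     return classical_3_states_tab
-- ===== SOURCE B (Python) =====
-- def classical_3_states(dssp_struct, stride_struct, promotif_struct, len):
--     out = []
--     for i in range(len):
--         triple = (dssp_struct[i], stride_struct[i], promotif_struct[i])
--         counts = {letter: triple.count(letter) for letter in "HEC"}
--         m = max(counts.values())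
--         if m == 0:
--             out.append("-")
--         elif m == 1:
--             out.append("*")
--         else:
--             best = next(letter for letter in "HEC" if counts[letter] == m)
--             out.append(best if m == 3 else best.lower())
--     return out
-- ===== Notes on version B (the rewrite author's own statement) =====
-- stated objective: simpler
-- what changed: Replaces the three pairwise-equality helpers and the nine-branch comparison cascade with a per-position frequency count of H/E/C and a single threshold on the maximum count (3->uppercase, 2->lowercase, 1->'*', 0->'-').
import Mathlib
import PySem

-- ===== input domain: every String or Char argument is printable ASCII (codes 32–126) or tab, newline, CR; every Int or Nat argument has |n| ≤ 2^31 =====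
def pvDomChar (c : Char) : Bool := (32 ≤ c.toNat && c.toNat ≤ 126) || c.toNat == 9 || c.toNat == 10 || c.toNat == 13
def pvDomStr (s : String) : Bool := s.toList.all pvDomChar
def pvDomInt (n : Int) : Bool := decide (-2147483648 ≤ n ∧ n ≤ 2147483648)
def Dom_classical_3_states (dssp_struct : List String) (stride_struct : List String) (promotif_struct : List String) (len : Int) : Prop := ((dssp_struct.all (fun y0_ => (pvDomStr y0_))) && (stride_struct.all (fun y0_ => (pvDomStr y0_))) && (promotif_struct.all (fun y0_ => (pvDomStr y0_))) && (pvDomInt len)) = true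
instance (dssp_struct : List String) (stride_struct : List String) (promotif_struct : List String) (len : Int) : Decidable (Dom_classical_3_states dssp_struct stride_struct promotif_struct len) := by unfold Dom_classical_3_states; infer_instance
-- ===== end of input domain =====

-- B replaces A's three equality helpers and nine-branch cascade by a per-position count of H/E/C and a threshold on the maximum count (simpler decision rule, same cost).


-- ===== PORT A =====
def pvEquality (a b c letter : String) : Int :=
  if a = b ∧ b = c ∧ c = letter then 1 else 0

def pvEqualityTwo (a b c letter : String) : Int :=
  if (a = b ∧ a = letter) ∨ (a = c ∧ a = letter) ∨ (b = c ∧ b = letter) then 1 else 0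

def pvOneEquality (a b c letter : String) : Int :=
  if (a = letter ∧ b ≠ letter ∧ c ≠ letter) ∨ (b = letter ∧ a ≠ letter ∧ c ≠ letter)
     ∨ (c = letter ∧ a ≠ letter ∧ b ≠ letter) then 1 else 0

-- indexing: inside Pre_ every pyGet? is `some`; the `.getD ""` default is never reached there
def classical_3_states (dssp_struct : List String) (stride_struct : List String) (promotif_struct : List String) (len : Int) : List String :=
  (PySem.List.pyRange 0 len 1).foldl (fun tab i =>
    let a := (PySem.List.pyGet? dssp_struct i).getD ""
    let b := (PySem.List.pyGet? stride_struct i).getD ""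
    let c := (PySem.List.pyGet? promotif_struct i).getD ""
    if pvEquality a b c "H" = 1 then tab ++ ["H"]
    else if pvEquality a b c "E" = 1 then tab ++ ["E"]
    else if pvEquality a b c "C" = 1 then tab ++ ["C"]
    else if pvEqualityTwo a b c "H" = 1 then tab ++ ["h"]
    else if pvEqualityTwo a b c "E" = 1 then tab ++ ["e"]
    else if pvEqualityTwo a b c "C" = 1 then tab ++ ["c"]
    else if pvOneEquality a b c "H" = 1 then tab ++ ["*"]
    else if pvOneEquality a b c "E" = 1 then tab ++ ["*"]
    else if pvOneEquality a b c "C" = 1 then tab ++ ["*"]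
    else tab ++ ["-"]) []

-- ===== PORT B =====
def pvLabel (a b c : String) : String :=
  let triple := [a, b, c]
  let cH := triple.count "H"
  let cE := triple.count "E"
  let cC := triple.count "C"
  let m := max cH (max cE cC)
  if m = 0 then "-"
  else if m = 1 then "*"
  else
    let best := if cH = m then "H" else if cE = m then "E" else "C"
    if m = 3 then best else PySem.Str.lower best

def classical_3_states_alt (dssp_struct : List String) (stride_struct : List String) (promotif_struct : List String) (len : Int) : List String :=
  (PySem.List.pyRange 0 len 1).map (fun i =>
    pvLabel ((PySem.List.pyGet? dssp_struct i).getD "")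
            ((PySem.List.pyGet? stride_struct i).getD "")
            ((PySem.List.pyGet? promotif_struct i).getD ""))

-- ===== PRECONDITION & SPEC =====
-- Pre_: Python A raises IndexError when len exceeds any of the three list lengths; those inputs are excluded.
def Pre_classical_3_states (dssp_struct : List String) (stride_struct : List String) (promotif_struct : List String) (len : Int) : Prop :=
  len ≤ dssp_struct.length ∧ len ≤ stride_struct.length ∧ len ≤ promotif_struct.length
instance (dssp_struct : List String) (stride_struct : List String) (promotif_struct : List String) (len : Int) : Decidable (Pre_classical_3_states dssp_struct stride_struct promotif_struct len) := by unfold Pre_classical_3_states; infer_instance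
def pvWitness_classical_3_states : List String × List String × List String × Int :=
  (["H", "E"], ["H", "C"], ["H", "X"], 2)

def Spec_classical_3_states (dssp_struct : List String) (stride_struct : List String) (promotif_struct : List String) (len : Int) (out : List String) : Prop := out = classical_3_states_alt dssp_struct stride_struct promotif_struct len
instance (dssp_struct : List String) (stride_struct : List String) (promotif_struct : List String) (len : Int) (out : List String) : Decidable (Spec_classical_3_states dssp_struct stride_struct promotif_struct len out) := by unfold Spec_classical_3_states; infer_instance

-- ===== CLAIM (what is proved, stated in full; the proofs are below) =====
def Claim_equal_classical_3_states : Prop := ∀ (dssp_struct : List String) (stride_struct : List String) (promotif_struct : List String) (len : Int), Dom_classical_3_states dssp_struct stride_struct promotif_struct len → Pre_classical_3_states dssp_struct stride_struct promotif_struct len → Spec_classical_3_states dssp_struct stride_struct promotif_struct len (classical_3_states dssp_struct stride_struct promotif_struct len)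

-- ===== LEMMAS AND PROOFS =====

-- A's per-position label, written as a value (the fold body appends exactly this)
def pvLabelA (a b c : String) : String :=
  if pvEquality a b c "H" = 1 then "H"
  else if pvEquality a b c "E" = 1 then "E"
  else if pvEquality a b c "C" = 1 then "C"
  else if pvEqualityTwo a b c "H" = 1 then "h"
  else if pvEqualityTwo a b c "E" = 1 then "e"
  else if pvEqualityTwo a b c "C" = 1 then "c"
  else if pvOneEquality a b c "H" = 1 then "*"
  else if pvOneEquality a b c "E" = 1 then "*"
  else if pvOneEquality a b c "C" = 1 then "*"
  else "-"

lemma pvCls4 (x : String) : x = "H" ∨ x = "E" ∨ x = "C" ∨ (x ≠ "H" ∧ x ≠ "E" ∧ x ≠ "C") := by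
  tauto

lemma pvLabel_eq (a b c : String) : pvLabelA a b c = pvLabel a b c := by
  rcases pvCls4 a with ha | ha | ha | ⟨ha1, ha2, ha3⟩ <;>
    rcases pvCls4 b with hb | hb | hb | ⟨hb1, hb2, hb3⟩ <;>
      rcases pvCls4 c with hc | hc | hc | ⟨hc1, hc2, hc3⟩ <;>
        subst_vars <;>
          simp_all [pvLabelA, pvLabel, pvEquality, pvEqualityTwo, pvOneEquality] <;> first | rfl | simp_all [eq_comm]

theorem classical_3_states_spec : Claim_equal_classical_3_states := by
  intro d s p len _ _
  unfold Spec_classical_3_states classical_3_states classical_3_states_alt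
  have h : ∀ (l : List Int) (acc : List String),
      l.foldl (fun tab i =>
        let a := (PySem.List.pyGet? d i).getD ""
        let b := (PySem.List.pyGet? s i).getD ""
        let c := (PySem.List.pyGet? p i).getD ""
        if pvEquality a b c "H" = 1 then tab ++ ["H"]
        else if pvEquality a b c "E" = 1 then tab ++ ["E"]
        else if pvEquality a b c "C" = 1 then tab ++ ["C"]
        else if pvEqualityTwo a b c "H" = 1 then tab ++ ["h"]
        else if pvEqualityTwo a b c "E" = 1 then tab ++ ["e"]
        else if pvEqualityTwo a b c "C" = 1 then tab ++ ["c"]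
        else if pvOneEquality a b c "H" = 1 then tab ++ ["*"]
        else if pvOneEquality a b c "E" = 1 then tab ++ ["*"]
        else if pvOneEquality a b c "C" = 1 then tab ++ ["*"]
        else tab ++ ["-"]) acc
      = acc ++ l.map (fun i =>
          pvLabel ((PySem.List.pyGet? d i).getD "")
                  ((PySem.List.pyGet? s i).getD "")
                  ((PySem.List.pyGet? p i).getD "")) := by
    intro l
    induction l with
    | nil => intro acc; simp
    | cons x xs ih =>
      intro acc
      simp only [List.foldl_cons, List.map_cons, ih]
      rw [← pvLabel_eq]
      simp [pvLabelA]
      split_ifs <;> simp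
  exact h _ []
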